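-- pv_equiv track=rewrite | github.com/Anupam1707/SecuriPy | SecuriPy.py | pwd
-- ===== SOURCE A (Python) =====
-- def pwd(message, key):
--     """Generates a non-readable key to encrypt the text"""
--     key = list(key)
--     for i in range(len(key)):
--         x = (ord(key[i]) + 200)
--         key[i] = chr(x)
--
--     if len(message) == len(key):
--         return(key)
--     elif len(message) > len(key):
--         for i in range(len(message) -len(key)):
--             key.append(key[i % len(key)])
--         return("" . join(key))
--     elif len(message) < len(key):
--         key = key[:len(message)]
--         return("" . join(key))
-- ===== SOURCE B (Python) =====
-- def pwd(message, key):
--     """Generates a non-readable key to encrypt the text"""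
--     t = "".join(chr(ord(c) + 200) for c in key)
--     m = len(message)
--     if m <= len(t):
--         return t[:m]
--     return (t * (m // len(t) + 1))[:m]
-- ===== Notes on version B (the rewrite author's own statement) =====
-- stated objective: simpler
-- what changed: B shifts the key once into a string t and extends it by whole-string replication t * (m // len(t) + 1) followed by a single slice, instead of A's in-place mutation loop plus a per-character append loop that indexes modularly into the growing list; Pre_ excludes equal-length inputs, where A returns a Python list instead of a str, and empty-key/nonempty-message inputs, where A raises ZeroDivisionError.
-- outside the precondition, e.g. on pwd('ab', 'ab'): A returns ['ĩ', 'Ī'], B returns 'ĩĪ'; on pwd('abc', ''): A raises ZeroDivisionError, B raises ZeroDivisionError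
import Mathlib
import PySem

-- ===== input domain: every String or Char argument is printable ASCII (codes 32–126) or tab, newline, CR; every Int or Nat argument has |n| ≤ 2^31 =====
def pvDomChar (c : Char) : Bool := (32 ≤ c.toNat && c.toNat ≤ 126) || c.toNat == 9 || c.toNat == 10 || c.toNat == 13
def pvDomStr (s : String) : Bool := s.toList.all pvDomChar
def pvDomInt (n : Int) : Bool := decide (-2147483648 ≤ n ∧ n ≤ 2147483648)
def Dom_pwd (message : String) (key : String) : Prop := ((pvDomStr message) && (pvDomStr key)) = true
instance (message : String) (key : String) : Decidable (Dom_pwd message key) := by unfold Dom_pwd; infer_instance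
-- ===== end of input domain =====

-- B replaces A's in-place transform loop and per-character append loop by whole-string
-- replication of the shifted key followed by one slice (objective: simpler).

-- ===== PORT A =====
-- A: key = list(key); for i in range(len(key)): key[i] = chr(ord(key[i]) + 200);
--    then ==/>/< branch chain; the > branch appends key[i % len(key)] into the growing list.
-- (On len(message)==len(key) Python A returns a LIST; outside its String return type — excluded by Pre_;
--  the port returns the joined string there.)
def pwd (message : String) (key : String) : String :=
  let k0 := key.toList
  let k := (PySem.List.pyRange 0 (k0.length : Int) 1).foldl
    (fun ks i => PySem.List.pySetD ks i (Char.ofNat ((PySem.List.pyGetD ks i ' ').toNat + 200))) k0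
  let m := message.toList
  if m.length = k.length then
    String.ofList k
  else if m.length > k.length then
    String.ofList ((PySem.List.pyRange 0 ((m.length : Int) - (k.length : Int)) 1).foldl
      (fun ks i => ks ++ [PySem.List.pyGetD ks (PySem.Int.mod i (PySem.List.len ks)) ' ']) k)
  else
    String.ofList (PySem.List.slice k none (some (m.length : Int)))

-- ===== PORT B =====
-- B: t = "".join(chr(ord(c)+200) for c in key); m = len(message);
--    t[:m] if m <= len(t), else (t * (m // len(t) + 1))[:m].
--    Python string replication t * n is List.flatten (List.replicate n t); slicing with a
--    nonnegative bound ≤ handled lengths is List.take.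
def pwd_alt (message : String) (key : String) : String :=
  let t := key.toList.map (fun c => Char.ofNat (c.toNat + 200))
  let m := message.toList.length
  if m ≤ t.length then
    String.ofList (t.take m)
  else
    String.ofList ((List.flatten (List.replicate (m / t.length + 1) t)).take m)

-- ===== PRECONDITION & SPEC =====
-- Pre_ excludes (i) equal-length message/key, where A returns a Python LIST of chars (not a str,
-- outside the declared return type), and (ii) empty key with nonempty message, where A raises
-- ZeroDivisionError (as does B).
def Pre_pwd (message : String) (key : String) : Prop :=
  message.toList.length ≠ key.toList.length ∧ key.toList ≠ []
instance (message : String) (key : String) : Decidable (Pre_pwd message key) := by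
  unfold Pre_pwd; infer_instance
def pvWitness_pwd : String × String := ("abc", "xy")

def Spec_pwd (message : String) (key : String) (out : String) : Prop := out = pwd_alt message key
instance (message : String) (key : String) (out : String) : Decidable (Spec_pwd message key out) := by unfold Spec_pwd; infer_instance

-- ===== CLAIM (what is proved, stated in full; the proofs are below) =====
def Claim_equal_pwd : Prop := ∀ (message : String) (key : String), Dom_pwd message key → Pre_pwd message key → Spec_pwd message key (pwd message key)

-- ===== LEMMAS AND PROOFS =====

-- A's in-place transform loop equals mapping f over the first j positions.
theorem transform_loop_eq (f : Char → Char) (l : List Char) (j : Nat) (hj : j ≤ l.length) :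
    (PySem.List.pyRange 0 (j : Int) 1).foldl
      (fun ks i => PySem.List.pySetD ks i (f (PySem.List.pyGetD ks i ' '))) l
      = (l.take j).map f ++ l.drop j := by
  induction j with
  | zero => simp [PySem.List.pyRange_one_eq_nil]
  | succ j ih =>
    have hj' : j ≤ l.length := Nat.le_of_succ_le hj
    have hlt : j < l.length := hj
    rw [show ((j+1 : Nat) : Int) = (j : Int) + 1 by push_cast; ring,
        PySem.List.pyRange_one_succ_right (by positivity), List.foldl_append, ih hj']
    simp only [List.foldl_cons, List.foldl_nil]
    have hlen : ((l.take j).map f).length = j := by simp [Nat.min_eq_left hj']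
    have hdrop : l.drop j = l[j] :: l.drop (j+1) := List.drop_eq_getElem_cons hlt
    rw [PySem.List.pySetD_natCast, PySem.List.pyGetD_natCast, hdrop]
    generalize hg : l[j] = x
    have hget : ((l.take j).map f ++ x :: l.drop (j+1)).getD j ' ' = x := by
      rw [List.getD_eq_getElem?_getD, List.getElem?_append_right hlen.le]
      simp [Nat.min_eq_left hj']
    have hset : ((l.take j).map f ++ x :: l.drop (j+1)).set j (f x)
        = (l.take j).map f ++ f x :: l.drop (j+1) := by
      rw [List.set_append_right _ _ hlen.le]
      simp [Nat.min_eq_left hj']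
    rw [hget, hset, List.take_add_one, List.getElem?_eq_getElem hlt]
    simp [hg]

-- The modular tiling of t, restricted to t's own length, is t itself.
theorem tile_self (t : List Char) :
    (List.range t.length).map (fun i => t.getD (i % t.length) ' ') = t := by
  apply List.ext_getElem
  · simp
  · intro i h1 h2
    have : i < t.length := by simpa using h1
    simp [Nat.mod_eq_of_lt this, List.getD_eq_getElem?_getD, List.getElem?_eq_getElem this]

-- A's append loop, started from t ≠ [], produces the modular tiling of t.
theorem append_loop_eq (t : List Char) (ht : t ≠ []) (j : Nat) :
    (PySem.List.pyRange 0 (j : Int) 1).foldl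
      (fun ks i => ks ++ [PySem.List.pyGetD ks (PySem.Int.mod i (PySem.List.len ks)) ' ']) t
      = (List.range (t.length + j)).map (fun i => t.getD (i % t.length) ' ') := by
  have htl : 0 < t.length := List.length_pos_iff.mpr ht
  induction j with
  | zero =>
    simp only [Nat.cast_zero, PySem.List.pyRange_one_eq_nil (le_refl (0:Int)), List.foldl_nil, Nat.add_zero]
    exact (tile_self t).symm
  | succ j ih =>
    rw [show ((j+1 : Nat) : Int) = (j : Int) + 1 by push_cast; ring,
        PySem.List.pyRange_one_succ_right (by positivity), List.foldl_append, ih]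
    simp only [List.foldl_cons, List.foldl_nil]
    have hlen : ((List.range (t.length + j)).map (fun i => t.getD (i % t.length) ' ')).length
        = t.length + j := by simp
    rw [PySem.List.len_eq, hlen]
    have hmod : PySem.Int.mod (j : Int) ((t.length + j : Nat) : Int)
        = ((j % (t.length + j) : Nat) : Int) := PySem.Int.mod_natCast j (t.length + j)
    rw [hmod, Nat.mod_eq_of_lt (by omega), PySem.List.pyGetD_natCast]
    have hget : ((List.range (t.length + j)).map (fun i => t.getD (i % t.length) ' ')).getD j ' '
        = t.getD (j % t.length) ' ' := by
      rw [List.getD_eq_getElem?_getD]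
      simp [List.getElem?_range (show j < t.length + j by omega)]
    rw [hget, show t.length + (j+1) = (t.length + j) + 1 by ring, List.range_succ, List.map_append]
    simp [Nat.add_mod_left]

-- B's replication of t is the modular tiling of t up to r * |t|.
theorem replicate_tile_eq (t : List Char) (r : Nat) :
    List.flatten (List.replicate r t)
      = (List.range (r * t.length)).map (fun i => t.getD (i % t.length) ' ') := by
  induction r with
  | zero => simp
  | succ r ih =>
    rw [List.replicate_succ', List.flatten_append, ih,
        show (r + 1) * t.length = r * t.length + t.length by ring,
        List.range_add, List.map_append, List.map_map]
    simp only [List.flatten_cons, List.flatten_nil, List.append_nil]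
    congr 1
    have : (List.range t.length).map
        ((fun i => t.getD (i % t.length) ' ') ∘ (fun j => r * t.length + j))
        = (List.range t.length).map (fun i => t.getD (i % t.length) ' ') := by
      apply List.map_congr_left
      intro j _
      simp [Function.comp]
    rw [this, tile_self]

-- ===== VERDICT (by name: the statement is the Claim_ definition above) =====
theorem pwd_spec : Claim_equal_pwd := by
  intro message key _ hpre
  obtain ⟨hne, hk⟩ := hpre
  have htr : (PySem.List.pyRange 0 (key.toList.length : Int) 1).foldl
      (fun ks i => PySem.List.pySetD ks i (Char.ofNat ((PySem.List.pyGetD ks i ' ').toNat + 200))) key.toList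
      = key.toList.map (fun c => Char.ofNat (c.toNat + 200)) := by
    rw [transform_loop_eq (fun c => Char.ofNat (c.toNat + 200)) key.toList
      key.toList.length (le_refl _)]
    rw [List.take_of_length_le (by simp), List.drop_length, List.append_nil]
  have hT : (key.toList.map (fun c => Char.ofNat (c.toNat + 200))).length = key.toList.length := by
    simp
  have hTne : key.toList.map (fun c => Char.ofNat (c.toNat + 200)) ≠ [] := by
    simpa using hk
  show pwd message key = pwd_alt message key
  unfold pwd pwd_alt
  simp only [htr, hT]
  rw [if_neg hne]
  set t := key.toList.map (fun c => Char.ofNat (c.toNat + 200)) with ht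
  have htl : 0 < t.length := List.length_pos_iff.mpr hTne
  by_cases hgt : message.toList.length > key.toList.length
  · rw [if_pos hgt, if_neg (by omega)]
    rw [show (message.toList.length : Int) - (key.toList.length : Int)
          = ((message.toList.length - key.toList.length : Nat) : Int) by omega,
        append_loop_eq _ hTne]
    rw [replicate_tile_eq]
    have hm : t.length + (message.toList.length - key.toList.length) = message.toList.length := by
      omega
    have hLe : message.toList.length ≤ (message.toList.length / t.length + 1) * t.length := by
      have h1 := Nat.div_add_mod message.toList.length t.length
      have h2 := Nat.mod_lt message.toList.length htl
      have h3 : (message.toList.length / t.length + 1) * t.length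
          = t.length * (message.toList.length / t.length) + t.length := by ring
      omega
    rw [hm]
    congr 1
    rw [← List.map_take, List.take_range]
    simp only [hT] at hLe ⊢
    rw [Nat.min_eq_left hLe]
  · rw [if_neg hgt, if_pos (by omega)]
    rw [PySem.List.slice_to_natCast]
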